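-- pv_equiv track=rewrite | github.com/civrealm/civrealm-sav | src/freeciv_sav/bean/parse_type.py | set_event
-- ===== SOURCE A (Python) =====
-- def set_event(value):
--     if_flag = False
--     output = ""
--     for s in value:
--         tmp = s
--         if s == '"':
--             if if_flag:
--                 if_flag = False
--             else:
--                 if_flag = True
--         if if_flag:
--             if s == ',':
--                 tmp = '@'
--         output += tmp
--     return output
-- ===== SOURCE B (Python) =====
-- def set_event(value):
--     parts = value.split('"')
--     return '"'.join(p.replace(',', '@') if i % 2 else p for i, p in enumerate(parts))
-- ===== Notes on version B (the rewrite author's own statement) =====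
-- stated objective: idiomatic
-- what changed: Replaces A's per-character quote-flag state machine by splitting the string at quote characters, substituting commas only inside the odd-indexed (in-quote) segments, and rejoining.
import Mathlib
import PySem

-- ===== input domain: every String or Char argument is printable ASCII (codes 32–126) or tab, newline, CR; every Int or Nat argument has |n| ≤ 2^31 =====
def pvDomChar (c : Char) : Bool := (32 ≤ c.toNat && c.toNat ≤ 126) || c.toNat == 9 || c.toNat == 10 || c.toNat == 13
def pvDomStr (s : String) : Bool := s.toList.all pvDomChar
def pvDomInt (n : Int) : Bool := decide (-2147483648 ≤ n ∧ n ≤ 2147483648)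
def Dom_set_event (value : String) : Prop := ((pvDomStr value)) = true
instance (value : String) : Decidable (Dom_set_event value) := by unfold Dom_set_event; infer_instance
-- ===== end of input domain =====

-- B replaces A's per-character quote-flag state machine by split-on-quote /
-- replace-in-odd-segments / rejoin (objective: idiomatic, same cost).

-- ===== PORT A =====
def set_event (value : String) : String :=
  String.ofList
    (value.toList.foldl
      (fun (st : Bool × List Char) s =>
        let tmp := s
        let if_flag := if s = '"' then !st.1 else st.1
        let tmp := if if_flag then (if s = ',' then '@' else tmp) else tmp
        (if_flag, st.2 ++ [tmp]))
      (false, [])).2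

-- ===== PORT B =====
def set_event_alt (value : String) : String :=
  -- value.split('"'): the separator is the nonempty literal '"', so split? is `some`
  let parts := (PySem.Str.split? value "\"").getD []
  PySem.Str.join "\""
    ((PySem.List.enumerate parts).map
      (fun ip => if ip.1 % 2 = 1 then PySem.Str.replace ip.2 "," "@" else ip.2))

-- ===== PRECONDITION & SPEC =====
def Spec_set_event (value : String) (out : String) : Prop := out = set_event_alt value
instance (value : String) (out : String) : Decidable (Spec_set_event value out) := by unfold Spec_set_event; infer_instance

-- ===== CLAIM (what is proved, stated in full; the proofs are below) =====
def Claim_equal_set_event : Prop := ∀ (value : String), Dom_set_event value → Spec_set_event value (set_event value)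

-- ===== LEMMAS AND PROOFS =====

-- the comma→'@' map on one segment
def repC (p : List Char) : List Char := p.map (fun c => if c = ',' then '@' else c)

-- split at '"' characters (simple structural form)
def splitQ : List Char → List (List Char)
  | [] => [[]]
  | c :: cs =>
    if c = '"' then [] :: splitQ cs
    else match splitQ cs with
      | [] => [[c]]
      | p :: ps => (c :: p) :: ps

-- A's loop, output only, flag as a parameter
def goA : Bool → List Char → List Char
  | _, [] => []
  | f, c :: cs =>
    let f' := if c = '"' then !f else f
    (if f' ∧ c = ',' then '@' else c) :: goA f' cs

def flagA : Bool → List Char → Bool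
  | f, [] => f
  | f, c :: cs => flagA (if c = '"' then !f else f) cs

-- alternating replacement over segments
def altm : Bool → List (List Char) → List (List Char)
  | _, [] => []
  | b, p :: ps => (if b then repC p else p) :: altm (!b) ps

theorem cons_headI_tail {α : Type} [Inhabited α] (l : List α) (h : l ≠ []) :
    l.headI :: l.tail = l := by
  cases l with
  | nil => exact absurd rfl h
  | cons a t => rfl

theorem splitQ_ne_nil (cs : List Char) : splitQ cs ≠ [] := by
  cases cs with
  | nil => simp [splitQ]
  | cons c cs =>
    simp only [splitQ]
    split
    · simp
    · split <;> simp

theorem foldA (cs : List Char) (f : Bool) (out : List Char) :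
    cs.foldl
      (fun (st : Bool × List Char) s =>
        let tmp := s
        let if_flag := if s = '"' then !st.1 else st.1
        let tmp := if if_flag then (if s = ',' then '@' else tmp) else tmp
        (if_flag, st.2 ++ [tmp]))
      (f, out) = (flagA f cs, out ++ goA f cs) := by
  induction cs generalizing f out with
  | nil => simp [flagA, goA]
  | cons c cs ih =>
    simp only [List.foldl_cons, goA, flagA, ih]
    by_cases hc : c = '"'
    · subst hc; simp
    · by_cases hcm : c = ',' <;> simp [hc, hcm]

theorem splitOn_go (fuel : Nat) (l cur : List Char) (acc : List (List Char))
    (h : l.length ≤ fuel) :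
    PySem.Chars.splitOn.go ['"'] fuel l cur acc
      = acc.reverse ++ (cur.reverse ++ (splitQ l).headI) :: (splitQ l).tail := by
  induction fuel generalizing l cur acc with
  | zero =>
    interval_cases hl : l.length
    rw [List.length_eq_zero_iff] at hl
    subst hl
    simp [PySem.Chars.splitOn.go, splitQ]
  | succ fuel ih =>
    cases l with
    | nil => simp [PySem.Chars.splitOn.go, splitQ]
    | cons c rest =>
      simp only [PySem.Chars.splitOn.go]
      by_cases hc : c = '"'
      · subst hc
        rw [if_pos (by simp [List.isPrefixOf])]
        have hd : List.drop (['"'].length) ('"' :: rest) = rest := rfl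
        rw [hd, ih rest [] (cur.reverse :: acc) (by simpa using Nat.le_of_succ_le_succ (by simpa using h))]
        have hne := splitQ_ne_nil rest
        have hsp : splitQ ('"' :: rest) = [] :: splitQ rest := by simp [splitQ]
        rw [hsp]
        obtain ⟨p, ps, hps⟩ := List.exists_cons_of_ne_nil hne
        simp [hps]
      · rw [if_neg (by simp [List.isPrefixOf]; intro hh; exact hc hh.symm)]
        rw [ih rest (c :: cur) acc (by simpa using Nat.le_of_succ_le_succ (by simpa using h))]
        have hne := splitQ_ne_nil rest
        obtain ⟨p, ps, hps⟩ := List.exists_cons_of_ne_nil hne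
        simp [splitQ, hc, hps]

theorem splitOn_eq (l : List Char) : PySem.Chars.splitOn l ['"'] = splitQ l := by
  have h := splitOn_go (l.length + 1) l [] [] (Nat.le_succ _)
  simp only [List.reverse_nil, List.nil_append] at h
  rw [PySem.Chars.splitOn, h, cons_headI_tail _ (splitQ_ne_nil l)]

theorem replace_go (fuel : Nat) (l acc : List Char) (h : l.length ≤ fuel) :
    PySem.Chars.replace.go [','] ['@'] fuel l acc = acc.reverse ++ repC l := by
  induction fuel generalizing l acc with
  | zero =>
    interval_cases hl : l.length
    rw [List.length_eq_zero_iff] at hl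
    subst hl
    simp [PySem.Chars.replace.go, repC]
  | succ fuel ih =>
    cases l with
    | nil => simp [PySem.Chars.replace.go, repC]
    | cons c rest =>
      simp only [PySem.Chars.replace.go]
      by_cases hc : c = ','
      · subst hc
        rw [if_pos (by simp [List.isPrefixOf])]
        have hd : List.drop ([','].length) (',' :: rest) = rest := rfl
        rw [hd, ih rest _ (by simpa using Nat.le_of_succ_le_succ (by simpa using h))]
        simp [repC]
      · rw [if_neg (by simp [List.isPrefixOf]; intro hh; exact hc hh.symm)]
        rw [ih rest _ (by simpa using Nat.le_of_succ_le_succ (by simpa using h))]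
        simp [repC, hc]

theorem replace_comma (p : List Char) : PySem.Chars.replace p [','] ['@'] = repC p := by
  simpa [PySem.Chars.replace] using replace_go p.length p [] (Nat.le_refl _)

theorem altm_ne_nil (b : Bool) (ps : List (List Char)) (h : ps ≠ []) : altm b ps ≠ [] := by
  cases ps with
  | nil => exact absurd rfl h
  | cons p ps => simp [altm]

theorem join_cons_head (s : List Char) (a : Char) (p : List Char) (ps : List (List Char)) :
    PySem.Chars.join s ((a :: p) :: ps) = a :: PySem.Chars.join s (p :: ps) := by
  cases ps <;> simp [PySem.Chars.join, List.intercalate]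

theorem join_altm (cs : List Char) (f : Bool) :
    PySem.Chars.join ['"'] (altm f (splitQ cs)) = goA f cs := by
  induction cs generalizing f with
  | nil =>
    cases f <;> simp [splitQ, altm, repC, goA, PySem.Chars.join, List.intercalate]
  | cons c cs ih =>
    by_cases hc : c = '"'
    · subst hc
      have hsp : splitQ ('"' :: cs) = [] :: splitQ cs := by simp [splitQ]
      have halt : altm f ([] :: splitQ cs) = [] :: altm (!f) (splitQ cs) := by
        cases f <;> simp [altm, repC]
      rw [hsp, halt]
      obtain ⟨q, qs, hq⟩ := List.exists_cons_of_ne_nil (altm_ne_nil (!f) _ (splitQ_ne_nil cs))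
      rw [hq]
      simp only [goA]
      have : PySem.Chars.join ['"'] ([] :: q :: qs) = '"' :: PySem.Chars.join ['"'] (q :: qs) := by
        simp [PySem.Chars.join, List.intercalate]
      rw [this, ← hq, ih]
      simp
    · obtain ⟨p, ps, hps⟩ := List.exists_cons_of_ne_nil (splitQ_ne_nil cs)
      simp only [splitQ, if_neg hc, hps, altm]
      have hrep : (if f = true then repC (c :: p) else c :: p)
          = (if f ∧ c = ',' then '@' else c) :: (if f = true then repC p else p) := by
        cases f <;> simp [repC]
      rw [hrep, join_cons_head]
      have : (if f = true then repC p else p) :: altm (!f) ps = altm f (splitQ cs) := by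
        simp [hps, altm]
      rw [this, ih]
      simp [goA, hc]

theorem enumerate_map_ofList (qs : List (List Char)) (k : Int) :
    PySem.List.enumerate (qs.map String.ofList) k
      = (PySem.List.enumerate qs k).map (fun ip => (ip.1, String.ofList ip.2)) := by
  induction qs generalizing k with
  | nil => simp [PySem.List.enumerate]
  | cons q qs ih => simp [PySem.List.enumerate, ih]

theorem enumerate_altm (qs : List (List Char)) (n : Nat) :
    ((PySem.List.enumerate qs (n : Int)).map
      (fun ip => if ip.1 % 2 = 1 then PySem.Chars.replace ip.2 [','] ['@'] else ip.2))
      = altm (decide (n % 2 = 1)) qs := by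
  induction qs generalizing n with
  | nil => simp [PySem.List.enumerate, altm]
  | cons q qs ih =>
    simp only [PySem.List.enumerate, List.map_cons, altm]
    congr 1
    · by_cases hn : n % 2 = 1
      · rw [if_pos (by omega), if_pos (by simpa using hn), replace_comma]
      · rw [if_neg (by omega), if_neg (by simpa using hn)]
    · have : (n : Int) + 1 = ((n + 1 : Nat) : Int) := by push_cast; ring
      rw [this, ih]
      congr 1
      rcases Nat.mod_two_eq_zero_or_one n with h | h <;>
        simp [h, Nat.add_mod]

theorem set_event_alt_eq (value : String) :
    set_event_alt value
      = String.ofList (PySem.Chars.join ['"'] (altm false (splitQ value.toList))) := by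
  have hsep : "\"".toList = ['"'] := rfl
  have hcm : ",".toList = [','] := rfl
  have hat : "@".toList = ['@'] := rfl
  simp only [set_event_alt, PySem.Str.split?, PySem.Chars.split?, PySem.Str.join,
    PySem.Str.replace, hsep, hcm, hat]
  rw [splitOn_eq]
  simp only [List.isEmpty_cons, Bool.false_eq_true, if_false, Option.map_some, Option.getD_some]
  congr 1
  rw [enumerate_map_ofList]
  rw [List.map_map, List.map_map]
  have : ((PySem.List.enumerate (splitQ value.toList) ((0 : Nat) : Int)).map
      (fun ip => if ip.1 % 2 = 1 then PySem.Chars.replace ip.2 [','] ['@'] else ip.2))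
      = altm (decide ((0 : Nat) % 2 = 1)) (splitQ value.toList) := enumerate_altm _ 0
  simp only [Nat.cast_zero, Nat.zero_mod] at this
  norm_num at this
  rw [← this]
  congr 1
  apply List.map_congr_left
  intro ip _
  by_cases h : ip.1 % 2 = 1 <;> simp [h, Function.comp]

-- ===== VERDICT (by name: the statement is the Claim_ definition above) =====
theorem set_event_spec : Claim_equal_set_event := by
  intro value _
  unfold Spec_set_event set_event
  rw [set_event_alt_eq, foldA, ← join_altm value.toList false]
  simp
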